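-- pv_equiv track=rewrite | github.com/JacobHelwig/verl | examples/data_preprocess/numina.py | remove_boxed
-- ===== SOURCE A (Python) =====
-- def remove_boxed(s):
--     s = s.strip()
--     for left in ("\\boxed ", "\\boxed{", "\\boxed", "\\fbox{", "\\fbox"):
--         if not s.startswith(left):
--             continue
--
--         content = s[len(left) :]
--         if left.endswith("{") and content.endswith("}"):
--             content = content[:-1]
--         return content.strip()
--
--     return s
-- ===== SOURCE B (Python) =====
-- def remove_boxed(s):
--     s = s.strip()
--     cmd = "\\boxed" if s.startswith("\\boxed") else "\\fbox" if s.startswith("\\fbox") else None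
--     if cmd is None:
--         return s
--     content = s[len(cmd):]
--     if content.startswith("{"):
--         content = content[1:]
--         if content.endswith("}"):
--             content = content[:-1]
--     return content.strip()
-- ===== Notes on version B (the rewrite author's own statement) =====
-- stated objective: simpler
-- what changed: B replaces A's ordered five-prefix loop by a two-way command match (\boxed / \fbox) followed by an explicit brace-delimiter check on the remainder, so the space/bare/brace variants collapse into one code path.
import Mathlib
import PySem

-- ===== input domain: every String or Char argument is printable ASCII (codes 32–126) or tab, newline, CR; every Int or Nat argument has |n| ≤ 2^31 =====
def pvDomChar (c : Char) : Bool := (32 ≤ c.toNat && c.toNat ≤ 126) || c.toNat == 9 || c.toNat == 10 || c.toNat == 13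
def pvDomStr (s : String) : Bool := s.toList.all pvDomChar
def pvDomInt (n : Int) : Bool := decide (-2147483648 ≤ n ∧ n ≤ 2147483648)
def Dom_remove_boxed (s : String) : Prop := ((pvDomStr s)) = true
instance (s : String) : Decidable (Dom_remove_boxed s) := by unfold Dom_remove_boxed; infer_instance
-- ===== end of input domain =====

-- B replaces A's ordered five-prefix loop by a two-way command match plus an explicit
-- brace-delimiter check; same cost, simpler decomposition.


-- ===== PORT A =====
-- the 'for left in (…)' loop: try each prefix in order, return on the first match
def removeBoxedGo (s : String) : List String → String
  | [] => s
  | left :: rest =>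
    if PySem.Str.startswith s left then
      let content := PySem.Str.slice s (some (PySem.Str.len left)) none
      let content :=
        if PySem.Str.endswith left "{" && PySem.Str.endswith content "}" then
          PySem.Str.slice content none (some (-1))
        else content
      PySem.Str.strip content
    else removeBoxedGo s rest

def remove_boxed (s : String) : String :=
  let s := PySem.Str.strip s
  removeBoxedGo s ["\\boxed ", "\\boxed{", "\\boxed", "\\fbox{", "\\fbox"]

-- ===== PORT B =====
def remove_boxed_alt (s : String) : String :=
  let t := PySem.Str.strip s
  let cmd? : Option String :=
    if PySem.Str.startswith t "\\boxed" then some "\\boxed"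
    else if PySem.Str.startswith t "\\fbox" then some "\\fbox"
    else none
  match cmd? with
  | none => t
  | some cmd =>
    let content := PySem.Str.slice t (some (PySem.Str.len cmd)) none
    if PySem.Str.startswith content "{" then
      let c1 := PySem.Str.slice content (some 1) none
      let c2 := if PySem.Str.endswith c1 "}" then PySem.Str.slice c1 none (some (-1)) else c1
      PySem.Str.strip c2
    else PySem.Str.strip content

-- ===== PRECONDITION & SPEC =====
def Spec_remove_boxed (s : String) (out : String) : Prop := out = remove_boxed_alt s
instance (s : String) (out : String) : Decidable (Spec_remove_boxed s out) := by unfold Spec_remove_boxed; infer_instance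

-- ===== CLAIM (what is proved, stated in full; the proofs are below) =====
def Claim_equal_remove_boxed : Prop := ∀ (s : String), Dom_remove_boxed s → Spec_remove_boxed s (remove_boxed s)

-- ===== LEMMAS AND PROOFS =====

theorem str_ext {s t : String} (h : s.toList = t.toList) : s = t := String.toList_injective h

theorem sw_iff (t p : String) : PySem.Str.startswith t p = true ↔ p.toList <+: t.toList := by
  simp [PySem.Str.startswith_eq, PySem.Chars.startswith_iff]

theorem strip_cons_space (x : List Char) : PySem.Chars.strip (' ' :: x) = PySem.Chars.strip x := by
  simp [PySem.Chars.strip, PySem.Chars.lstrip, PySem.Chars.isspace]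

-- "content did not start with '{'" as a Bool fact, from a head-character mismatch
theorem sw_brace_false {u : String} {c : Char} {x : List Char}
    (hu : u.toList = c :: x) (hc : c ≠ '{') : PySem.Str.startswith u "{" = false := by
  rw [Bool.eq_false_iff]
  intro h
  have := (sw_iff _ _).mp h
  rw [hu, show ("{" : String).toList = ['{'] from rfl, List.cons_prefix_cons] at this
  exact hc this.1.symm
theorem main_eq (t : String) :
    removeBoxedGo t ["\\boxed ", "\\boxed{", "\\boxed", "\\fbox{", "\\fbox"]
      = (match (if PySem.Str.startswith t "\\boxed" then some "\\boxed"
               else if PySem.Str.startswith t "\\fbox" then some "\\fbox"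
               else none : Option String) with
         | none => t
         | some cmd =>
           let content := PySem.Str.slice t (some (PySem.Str.len cmd)) none
           if PySem.Str.startswith content "{" then
             let c1 := PySem.Str.slice content (some 1) none
             let c2 := if PySem.Str.endswith c1 "}" then PySem.Str.slice c1 none (some (-1)) else c1
             PySem.Str.strip c2
           else PySem.Str.strip content) := by
  have l7 : PySem.Str.len "\\boxed " = 7 := by decide
  have l7b : PySem.Str.len "\\boxed{" = 7 := by decide
  have l6 : PySem.Str.len "\\boxed" = 6 := by decide
  have l6f : PySem.Str.len "\\fbox{" = 6 := by decide
  have l5 : PySem.Str.len "\\fbox" = 5 := by decide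
  by_cases h1 : PySem.Str.startswith t "\\boxed " = true
  · -- matched "\boxed "
    obtain ⟨r, hr⟩ := (sw_iff _ _).mp h1
    have h3 : PySem.Str.startswith t "\\boxed" = true :=
      (sw_iff _ _).mpr (List.IsPrefix.trans (by decide) ((sw_iff _ _).mp h1))
    have hd6 : t.toList.drop 6 = ' ' :: r := by rw [← hr]; rfl
    have hd7 : t.toList.drop 7 = r := by rw [← hr]; rfl
    have hc6 : (PySem.Str.slice t (some (6:Int)) none).toList = ' ' :: r := by
      rw [show (PySem.Str.slice t (some (6:Int)) none).toList = t.toList.drop 6 by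
        simp [PySem.Str.toList_slice, PySem.List.slice_from], hd6]
    have hsw : PySem.Str.startswith (PySem.Str.slice t (some (6:Int)) none) "{" = false :=
      sw_brace_false hc6 (by decide)
    simp only [removeBoxedGo, h1, h3, if_true, l7, l6, hsw, if_false, Bool.false_eq_true,
      show PySem.Str.endswith "\\boxed " "{" = false from by decide, Bool.false_and]
    apply str_ext
    simp only [PySem.Str.toList_strip, hc6,
      show (PySem.Str.slice t (some (7:Int)) none).toList = t.toList.drop 7 by
        simp [PySem.Str.toList_slice, PySem.List.slice_from], hd7]
    exact (strip_cons_space r).symm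
  · have h1' : PySem.Str.startswith t "\\boxed " = false := by simpa using h1
    by_cases h2 : PySem.Str.startswith t "\\boxed{" = true
    · -- matched "\boxed{"
      obtain ⟨r, hr⟩ := (sw_iff _ _).mp h2
      have h3 : PySem.Str.startswith t "\\boxed" = true :=
        (sw_iff _ _).mpr (List.IsPrefix.trans (by decide) ((sw_iff _ _).mp h2))
      have hd6 : t.toList.drop 6 = '{' :: r := by rw [← hr]; rfl
      have hd7 : t.toList.drop 7 = r := by rw [← hr]; rfl
      have hc6 : (PySem.Str.slice t (some (6:Int)) none).toList = '{' :: r := by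
        rw [show (PySem.Str.slice t (some (6:Int)) none).toList = t.toList.drop 6 by
          simp [PySem.Str.toList_slice, PySem.List.slice_from], hd6]
      have hsw : PySem.Str.startswith (PySem.Str.slice t (some (6:Int)) none) "{" = true := by
        rw [sw_iff, hc6]
        exact ⟨r, rfl⟩
      have hceq : PySem.Str.slice (PySem.Str.slice t (some (6:Int)) none) (some 1) none
          = PySem.Str.slice t (some (7:Int)) none := by
        apply str_ext
        simp [PySem.Str.toList_slice, PySem.List.slice_from, hc6, hd7]
      simp only [removeBoxedGo, h1', h2, h3, if_true, if_false, Bool.false_eq_true, l7b, l6, hsw, hceq,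
        show PySem.Str.endswith "\\boxed{" "{" = true from by decide, Bool.true_and]
    · have h2' : PySem.Str.startswith t "\\boxed{" = false := by simpa using h2
      by_cases h3 : PySem.Str.startswith t "\\boxed" = true
      · -- matched bare "\boxed"
        obtain ⟨r, hr⟩ := (sw_iff _ _).mp h3
        have hd6 : t.toList.drop 6 = r := by rw [← hr]; rfl
        have hsw : PySem.Str.startswith (PySem.Str.slice t (some (6:Int)) none) "{" = false := by
          rw [Bool.eq_false_iff]
          intro h
          have hp := (sw_iff _ _).mp h
          rw [show (PySem.Str.slice t (some (6:Int)) none).toList = t.toList.drop 6 by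
            simp [PySem.Str.toList_slice, PySem.List.slice_from], hd6] at hp
          obtain ⟨u, hu⟩ := hp
          apply absurd h2
          simp only [not_not]
          rw [sw_iff]
          refine ⟨u, ?_⟩
          rw [show ("\\boxed{" : String).toList = ("\\boxed" : String).toList ++ ['{'] from rfl,
            List.append_assoc]
          rw [show (['{'] ++ u : List Char) = ("{" : String).toList ++ u from rfl, hu]
          exact hr
        simp only [removeBoxedGo, h1', h2', h3, if_true, if_false, Bool.false_eq_true, l6, hsw,
          show PySem.Str.endswith "\\boxed" "{" = false from by decide, Bool.false_and]
      · have h3' : PySem.Str.startswith t "\\boxed" = false := by simpa using h3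
        by_cases h4 : PySem.Str.startswith t "\\fbox{" = true
        · -- matched "\fbox{"
          obtain ⟨r, hr⟩ := (sw_iff _ _).mp h4
          have h5 : PySem.Str.startswith t "\\fbox" = true :=
            (sw_iff _ _).mpr (List.IsPrefix.trans (by decide) ((sw_iff _ _).mp h4))
          have hd5 : t.toList.drop 5 = '{' :: r := by rw [← hr]; rfl
          have hd6 : t.toList.drop 6 = r := by rw [← hr]; rfl
          have hc5 : (PySem.Str.slice t (some (5:Int)) none).toList = '{' :: r := by
            rw [show (PySem.Str.slice t (some (5:Int)) none).toList = t.toList.drop 5 by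
              simp [PySem.Str.toList_slice, PySem.List.slice_from], hd5]
          have hsw : PySem.Str.startswith (PySem.Str.slice t (some (5:Int)) none) "{" = true := by
            rw [sw_iff, hc5]
            exact ⟨r, rfl⟩
          have hceq : PySem.Str.slice (PySem.Str.slice t (some (5:Int)) none) (some 1) none
              = PySem.Str.slice t (some (6:Int)) none := by
            apply str_ext
            simp [PySem.Str.toList_slice, PySem.List.slice_from, hc5, hd6]
          simp only [removeBoxedGo, h1', h2', h3', h4, h5, if_true, if_false, Bool.false_eq_true,
            l6f, l5, hsw, hceq,
            show PySem.Str.endswith "\\fbox{" "{" = true from by decide, Bool.true_and]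
        · have h4' : PySem.Str.startswith t "\\fbox{" = false := by simpa using h4
          by_cases h5 : PySem.Str.startswith t "\\fbox" = true
          · -- matched bare "\fbox"
            obtain ⟨r, hr⟩ := (sw_iff _ _).mp h5
            have hd5 : t.toList.drop 5 = r := by rw [← hr]; rfl
            have hsw : PySem.Str.startswith (PySem.Str.slice t (some (5:Int)) none) "{" = false := by
              rw [Bool.eq_false_iff]
              intro h
              have hp := (sw_iff _ _).mp h
              rw [show (PySem.Str.slice t (some (5:Int)) none).toList = t.toList.drop 5 by
                simp [PySem.Str.toList_slice, PySem.List.slice_from], hd5] at hp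
              obtain ⟨u, hu⟩ := hp
              apply absurd h4
              simp only [not_not]
              rw [sw_iff]
              refine ⟨u, ?_⟩
              rw [show ("\\fbox{" : String).toList = ("\\fbox" : String).toList ++ ['{'] from rfl,
                List.append_assoc]
              rw [show (['{'] ++ u : List Char) = ("{" : String).toList ++ u from rfl, hu]
              exact hr
            simp only [removeBoxedGo, h1', h2', h3', h4', h5, if_true, if_false,
              Bool.false_eq_true, l5, hsw,
              show PySem.Str.endswith "\\fbox" "{" = false from by decide, Bool.false_and]
          · have h5' : PySem.Str.startswith t "\\fbox" = false := by simpa using h5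
            simp only [removeBoxedGo, h1', h2', h3', h4', h5', if_false, Bool.false_eq_true]

-- ===== VERDICT (by name: the statement is the Claim_ definition above) =====
theorem remove_boxed_spec : Claim_equal_remove_boxed := by
  intro s _
  unfold Spec_remove_boxed remove_boxed remove_boxed_alt
  exact main_eq (PySem.Str.strip s)
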